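-- pv_equiv track=rewrite | github.com/NicolasMoreauCPage/POC_TESTING_INTEROP | app/services/pam_validation.py | _get_all_segments
-- ===== SOURCE A (Python) =====
-- from typing import List, Dict, Optional, Set
--
-- def _split_lines(msg: str) -> List[str]:
--     if not msg:
--         return []
--     return msg.replace("\r\n", "\r").replace("\n", "\r").split("\r")
--
-- def _get_all_segments(msg: str) -> Set[str]:
--     """Retourne l'ensemble des types de segments présents dans le message."""
--     segments = set()
--     for line in _split_lines(msg):
--         if not line or "|" not in line:
--             continue
--         seg_type = line.split("|")[0]
--         if seg_type:
--             segments.add(seg_type)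
--     return segments
-- ===== SOURCE B (Python) =====
-- def _get_all_segments(msg: str):
--     """One-pass character state machine over msg: accumulate the current
--     line's segment-type prefix until the field separator is seen, and emit
--     it at each line break."""
--     segments = set()
--     prefix = []
--     seen_pipe = False
--     for ch in msg:
--         if ch == "\r" or ch == "\n":
--             if seen_pipe and prefix:
--                 segments.add("".join(prefix))
--             prefix = []
--             seen_pipe = False
--         elif ch == "|":
--             seen_pipe = True
--         elif not seen_pipe:
--             prefix.append(ch)
--     if seen_pipe and prefix:
--         segments.add("".join(prefix))
--     return segments
-- ===== Notes on version B (the rewrite author's own statement) =====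
-- stated objective: alternative
-- what changed: Replaced the replace/replace/split line-splitting plus per-line prefix-split loop by a single left-to-right character state machine that accumulates the current line's segment-type prefix and emits it at each line separator.
import Mathlib
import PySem

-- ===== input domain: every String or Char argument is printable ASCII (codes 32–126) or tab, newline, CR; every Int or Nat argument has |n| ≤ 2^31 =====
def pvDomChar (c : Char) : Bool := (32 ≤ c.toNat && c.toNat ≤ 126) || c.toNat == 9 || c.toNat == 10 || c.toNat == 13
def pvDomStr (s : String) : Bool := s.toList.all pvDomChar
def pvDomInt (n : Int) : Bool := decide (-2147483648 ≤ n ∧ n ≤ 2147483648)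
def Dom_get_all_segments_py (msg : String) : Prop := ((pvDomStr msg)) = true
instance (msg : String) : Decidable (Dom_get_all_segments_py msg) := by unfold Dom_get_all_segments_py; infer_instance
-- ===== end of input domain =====

-- B replaces A's replace/replace/split line loop by a one-pass character state machine; return value proved equal on all of Dom (objective: alternative, same O(n) cost).


-- ===== PORT A =====
def split_lines_py (msg : String) : List String :=
  if msg = "" then []
  else ((PySem.Str.split? (PySem.Str.replace (PySem.Str.replace msg "\r\n" "\r") "\n" "\r") "\r").getD [])

def get_all_segments_py (msg : String) : List String :=
  (split_lines_py msg).foldl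
    (fun segments line =>
      if line = "" ∨ PySem.Str.isIn "|" line = false then segments
      else
        let seg_type := ((PySem.Str.split? line "|").getD []).headD ""
        if seg_type ≠ "" then PySem.Set.add segments seg_type else segments)
    PySem.Set.empty

-- ===== PORT B =====
def get_all_segments_py_alt (msg : String) : List String :=
  let fin := msg.toList.foldl
    (fun (st : PySem.Set String × List Char × Bool) ch =>
      if ch = '\r' ∨ ch = '\n' then
        (if st.2.2 = true ∧ st.2.1 ≠ [] then PySem.Set.add st.1 (String.ofList st.2.1) else st.1,
         [], false)
      else if ch = '|' then (st.1, st.2.1, true)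
      else if st.2.2 = true then st
      else (st.1, st.2.1 ++ [ch], false))
    (PySem.Set.empty, [], false)
  if fin.2.2 = true ∧ fin.2.1 ≠ [] then PySem.Set.add fin.1 (String.ofList fin.2.1) else fin.1

-- ===== PRECONDITION & SPEC =====
def Spec_get_all_segments_py (msg : String) (out : List String) : Prop := out = get_all_segments_py_alt msg
instance (msg : String) (out : List String) : Decidable (Spec_get_all_segments_py msg out) := by unfold Spec_get_all_segments_py; infer_instance

-- ===== CLAIM (what is proved, stated in full; the proofs are below) =====
def Claim_equal_get_all_segments_py : Prop := ∀ (msg : String), Dom_get_all_segments_py msg → Spec_get_all_segments_py msg (get_all_segments_py msg)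

-- ===== LEMMAS AND PROOFS =====

def pvNorm1 : List Char → List Char
  | [] => []
  | [c] => [c]
  | c :: d :: t => if c = '\r' ∧ d = '\n' then '\r' :: pvNorm1 t else c :: pvNorm1 (d :: t)

theorem L1 : ∀ (fuel : Nat) (l acc : List Char), l.length ≤ fuel →
    PySem.Chars.replace.go ['\r', '\n'] ['\r'] fuel l acc = acc.reverse ++ pvNorm1 l := by
  intro fuel
  induction fuel with
  | zero => intro l acc h
            have : l = [] := by cases l <;> simp_all
            simp [this, PySem.Chars.replace.go, pvNorm1]
  | succ n ih =>
    intro l acc h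
    match l with
    | [] => simp [PySem.Chars.replace.go, pvNorm1]
    | [c] =>
      rcases eq_or_ne c '\r' with hc | hc
      · simp [PySem.Chars.replace.go, List.isPrefixOf, hc, pvNorm1,
              ih [] ('\r' :: acc) (by simp)]
      · simp [PySem.Chars.replace.go, List.isPrefixOf, hc, Ne.symm hc, pvNorm1,
              ih [] (c :: acc) (by simp)]
    | c :: d :: t =>
      simp at h
      rcases eq_or_ne c '\r' with hc | hc
      · rcases eq_or_ne d '\n' with hd | hd
        · simp [PySem.Chars.replace.go, List.isPrefixOf, hc, hd, pvNorm1,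
                ih t _ (by omega)]
        · simp [PySem.Chars.replace.go, List.isPrefixOf, hc, hd, Ne.symm hd, pvNorm1,
                ih (d :: t) _ (by simp; omega)]
      · simp [PySem.Chars.replace.go, List.isPrefixOf, hc, Ne.symm hc, pvNorm1,
              ih (d :: t) _ (by simp; omega)]

def pvNorm2 (cs : List Char) : List Char := cs.map (fun c => if c = '\n' then '\r' else c)

def pvSplitc (sep : Char) : List Char → List Char × List (List Char)
  | [] => ([], [])
  | c :: t =>
      if c = sep then ([], (pvSplitc sep t).1 :: (pvSplitc sep t).2)
      else (c :: (pvSplitc sep t).1, (pvSplitc sep t).2)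

theorem L2 : ∀ (fuel : Nat) (l acc : List Char), l.length ≤ fuel →
    PySem.Chars.replace.go ['\n'] ['\r'] fuel l acc = acc.reverse ++ pvNorm2 l := by
  intro fuel
  induction fuel with
  | zero => intro l acc h
            have : l = [] := by cases l <;> simp_all
            simp [this, PySem.Chars.replace.go, pvNorm2]
  | succ n ih =>
    intro l acc h
    match l with
    | [] => simp [PySem.Chars.replace.go, pvNorm2]
    | c :: t =>
      simp at h
      rcases eq_or_ne c '\n' with hc | hc
      · simp [PySem.Chars.replace.go, List.isPrefixOf, hc, pvNorm2, ih t _ (by omega)]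
      · simp [PySem.Chars.replace.go, List.isPrefixOf, hc, Ne.symm hc, pvNorm2, ih t _ (by omega)]

theorem L3 (sep : Char) : ∀ (fuel : Nat) (l cur : List Char) (acc : List (List Char)),
    l.length ≤ fuel →
    PySem.Chars.splitOn.go [sep] fuel l cur acc =
      acc.reverse ++ (cur.reverse ++ (pvSplitc sep l).1) :: (pvSplitc sep l).2 := by
  intro fuel
  induction fuel with
  | zero => intro l cur acc h
            have : l = [] := by cases l <;> simp_all
            simp [this, PySem.Chars.splitOn.go, pvSplitc]
  | succ n ih =>
    intro l cur acc h
    match l with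
    | [] => simp [PySem.Chars.splitOn.go, pvSplitc]
    | c :: t =>
      simp at h
      rcases eq_or_ne c sep with hc | hc
      · simp [PySem.Chars.splitOn.go, List.isPrefixOf, hc, pvSplitc, ih t _ _ (by omega)]
      · simp [PySem.Chars.splitOn.go, List.isPrefixOf, hc, Ne.symm hc, pvSplitc, ih t _ _ (by omega)]

def pvIsSep (c : Char) : Bool := c = '\r' || c = '\n'

def pvSplitAny : List Char → List Char × List (List Char)
  | [] => ([], [])
  | c :: t =>
      if pvIsSep c then ([], (pvSplitAny t).1 :: (pvSplitAny t).2)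
      else (c :: (pvSplitAny t).1, (pvSplitAny t).2)

def pvStepC (st : List Char × Bool) (ch : Char) : List Char × Bool :=
  if ch = '|' then (st.1, true) else if st.2 = true then st else (st.1 ++ [ch], false)

def pvEmit (s : PySem.Set String) (st : List Char × Bool) : PySem.Set String :=
  if st.2 = true ∧ st.1 ≠ [] then PySem.Set.add s (String.ofList st.1) else s

def pvAL (s : PySem.Set String) (l : List Char) : PySem.Set String :=
  pvEmit s (l.foldl pvStepC ([], false))

def pvContFold (s : PySem.Set String) (st : List Char × Bool)
    (p : List Char × List (List Char)) : PySem.Set String :=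
  (p.2).foldl pvAL (pvEmit s (p.1.foldl pvStepC st))

-- B's fold step (same term as in the port)
def pvStepB (st : PySem.Set String × List Char × Bool) (ch : Char) : PySem.Set String × List Char × Bool :=
  if ch = '\r' ∨ ch = '\n' then
    (if st.2.2 = true ∧ st.2.1 ≠ [] then PySem.Set.add st.1 (String.ofList st.2.1) else st.1, [], false)
  else if ch = '|' then (st.1, st.2.1, true)
  else if st.2.2 = true then st
  else (st.1, st.2.1 ++ [ch], false)

theorem L5 : ∀ (cs : List Char) (s : PySem.Set String) (st : List Char × Bool),
    pvEmit (cs.foldl pvStepB (s, st)).1 (cs.foldl pvStepB (s, st)).2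
      = pvContFold s st (pvSplitAny cs) := by
  intro cs
  induction cs with
  | nil => intro s st; simp [pvSplitAny, pvContFold]
  | cons c t ih =>
    intro s st
    by_cases hsep : c = '\r' ∨ c = '\n'
    · have h1 : pvStepB (s, st) c = (pvEmit s st, [], false) := by
        simp [pvStepB, hsep, pvEmit]
      have h2 : pvIsSep c = true := by rcases hsep with h | h <;> simp [pvIsSep, h]
      simp only [List.foldl_cons, h1, ih, pvSplitAny, h2, if_pos]
      simp [pvContFold, pvAL]
    · have h1 : pvStepB (s, st) c = (s, pvStepC st c) := by
        rcases eq_or_ne c '|' with hp | hp <;>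
          simp [pvStepB, hsep, pvStepC, hp] <;> rcases st with ⟨p, b⟩ <;> cases b <;> simp
      have h2 : pvIsSep c = false := by
        simp [pvIsSep]; push_neg at hsep; exact hsep
      simp only [List.foldl_cons, h1, ih, pvSplitAny, h2, Bool.false_eq_true, if_neg, not_false_iff]
      simp [pvContFold]

theorem contFold_emptyFirst (s : PySem.Set String) (st : List Char × Bool)
    (h : List Char) (r : List (List Char)) :
    pvContFold s st ([], h :: r) = pvContFold (pvEmit s st) ([], false) (h, r) := by
  simp [pvContFold, pvAL]

theorem contFold_consFirst (s : PySem.Set String) (st : List Char × Bool)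
    (c : Char) (h : List Char) (r : List (List Char)) :
    pvContFold s st (c :: h, r) = pvContFold s (pvStepC st c) (h, r) := by
  simp [pvContFold]


theorem L6 : ∀ (n : Nat) (cs : List Char), cs.length ≤ n →
    ∀ (s : PySem.Set String) (st : List Char × Bool),
    pvContFold s st (pvSplitAny cs)
      = pvContFold s st (pvSplitc '\r' (pvNorm2 (pvNorm1 cs))) := by
  intro n
  induction n with
  | zero => intro cs h
            have : cs = [] := by cases cs <;> simp_all
            subst this; intro s st; rfl
  | succ n ih =>
    intro cs h s st
    -- step for a head whose pvNorm1 passes it through unchanged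
    have step : ∀ (c : Char) (t : List Char), t.length ≤ n →
        pvContFold s st (pvSplitAny (c :: t))
          = pvContFold s st (pvSplitc '\r' ((if c = '\n' then '\r' else c) :: pvNorm2 (pvNorm1 t))) := by
      intro c t ht
      by_cases hsep : c = '\r' ∨ c = '\n'
      · have h1 : pvIsSep c = true := by rcases hsep with h | h <;> simp [pvIsSep, h]
        have h2 : (if c = '\n' then '\r' else c) = '\r' := by
          rcases hsep with h | h <;> simp [h]
        have hA : pvSplitAny (c :: t) = ([], (pvSplitAny t).1 :: (pvSplitAny t).2) := by
          simp [pvSplitAny, h1]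
        have hC : pvSplitc '\r' ('\r' :: pvNorm2 (pvNorm1 t))
            = ([], (pvSplitc '\r' (pvNorm2 (pvNorm1 t))).1 :: (pvSplitc '\r' (pvNorm2 (pvNorm1 t))).2) := by
          simp [pvSplitc]
        rw [h2, hA, hC]
        rw [show ((pvSplitAny t).1 :: (pvSplitAny t).2 : List (List Char))
              = (pvSplitAny t).1 :: (pvSplitAny t).2 from rfl] at *
        rw [contFold_emptyFirst, contFold_emptyFirst]
        have := ih t ht (pvEmit s st) ([], false)
        rw [show (pvSplitAny t) = ((pvSplitAny t).1, (pvSplitAny t).2) from rfl] at this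
        rw [show (pvSplitc '\r' (pvNorm2 (pvNorm1 t)))
              = ((pvSplitc '\r' (pvNorm2 (pvNorm1 t))).1, (pvSplitc '\r' (pvNorm2 (pvNorm1 t))).2) from rfl] at this
        exact this
      · have h1 : pvIsSep c = false := by
          simp only [pvIsSep, Bool.or_eq_false_iff, decide_eq_false_iff_not]
          exact ⟨fun h => hsep (Or.inl h), fun h => hsep (Or.inr h)⟩
        have h2 : (if c = '\n' then '\r' else c) = c :=
          if_neg (fun h => hsep (Or.inr h))
        have h3 : c ≠ '\r' := fun h => hsep (Or.inl h)
        have hA : pvSplitAny (c :: t) = (c :: (pvSplitAny t).1, (pvSplitAny t).2) := by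
          simp [pvSplitAny, h1]
        have hC : pvSplitc '\r' (c :: pvNorm2 (pvNorm1 t))
            = (c :: (pvSplitc '\r' (pvNorm2 (pvNorm1 t))).1, (pvSplitc '\r' (pvNorm2 (pvNorm1 t))).2) := by
          simp [pvSplitc, h3]
        rw [h2, hA, hC, contFold_consFirst, contFold_consFirst]
        have := ih t ht s (pvStepC st c)
        rw [show (pvSplitAny t) = ((pvSplitAny t).1, (pvSplitAny t).2) from rfl] at this
        rw [show (pvSplitc '\r' (pvNorm2 (pvNorm1 t)))
              = ((pvSplitc '\r' (pvNorm2 (pvNorm1 t))).1, (pvSplitc '\r' (pvNorm2 (pvNorm1 t))).2) from rfl] at this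
        exact this
    match cs with
    | [] => rfl
    | [c] =>
      have hN : pvNorm2 (pvNorm1 [c]) = [if c = '\n' then '\r' else c] := by
        simp [pvNorm1, pvNorm2]
      calc pvContFold s st (pvSplitAny [c])
          = pvContFold s st (pvSplitc '\r' ((if c = '\n' then '\r' else c) :: pvNorm2 (pvNorm1 []))) :=
            step c [] (by simp)
        _ = pvContFold s st (pvSplitc '\r' (pvNorm2 (pvNorm1 [c]))) := by
            rw [hN]; rfl
    | c :: d :: t =>
      simp at h
      by_cases hcd : c = '\r' ∧ d = '\n'
      · obtain ⟨rfl, rfl⟩ := hcd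
        have hN : pvNorm2 (pvNorm1 ('\r' :: '\n' :: t)) = '\r' :: pvNorm2 (pvNorm1 t) := by
          simp [pvNorm1, pvNorm2]
        have hA : pvSplitAny ('\r' :: '\n' :: t)
            = ([], [] :: (pvSplitAny t).1 :: (pvSplitAny t).2) := by
          simp [pvSplitAny, pvIsSep]
        have hC : pvSplitc '\r' ('\r' :: pvNorm2 (pvNorm1 t))
            = ([], (pvSplitc '\r' (pvNorm2 (pvNorm1 t))).1 :: (pvSplitc '\r' (pvNorm2 (pvNorm1 t))).2) := by
          simp [pvSplitc]
        rw [hN, hA, hC, contFold_emptyFirst, contFold_emptyFirst, contFold_emptyFirst]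
        have hE : pvEmit (pvEmit s st) (([] : List Char), false) = pvEmit s st := by simp [pvEmit]
        rw [hE]
        have := ih t (by omega) (pvEmit s st) ([], false)
        rw [show (pvSplitAny t) = ((pvSplitAny t).1, (pvSplitAny t).2) from rfl] at this
        rw [show (pvSplitc '\r' (pvNorm2 (pvNorm1 t)))
              = ((pvSplitc '\r' (pvNorm2 (pvNorm1 t))).1, (pvSplitc '\r' (pvNorm2 (pvNorm1 t))).2) from rfl] at this
        exact this
      · have hN : pvNorm2 (pvNorm1 (c :: d :: t))
            = (if c = '\n' then '\r' else c) :: pvNorm2 (pvNorm1 (d :: t)) := by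
          simp [pvNorm1, hcd, pvNorm2]
        rw [hN]
        exact step c (d :: t) (by simp; omega)

theorem splitc_fst (sep : Char) : ∀ l : List Char, (pvSplitc sep l).1 = l.takeWhile (· ≠ sep) := by
  intro l
  induction l with
  | nil => rfl
  | cons c t ih =>
    rcases eq_or_ne c sep with hc | hc <;> simp [pvSplitc, hc, List.takeWhile_cons, ih]

theorem stepC_true : ∀ (l : List Char) (p : List Char), l.foldl pvStepC (p, true) = (p, true) := by
  intro l
  induction l with
  | nil => intro p; rfl
  | cons c t ih => intro p; rcases eq_or_ne c '|' with hc | hc <;> simp [pvStepC, hc, ih]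

theorem stepC_false : ∀ (l : List Char) (p : List Char),
    l.foldl pvStepC (p, false) = (p ++ l.takeWhile (· ≠ '|'), l.any (· = '|')) := by
  intro l
  induction l with
  | nil => intro p; simp
  | cons c t ih =>
    intro p
    rcases eq_or_ne c '|' with hc | hc
    · simp [pvStepC, hc, stepC_true, List.takeWhile_cons]
    · simp [pvStepC, hc, ih, List.takeWhile_cons]

-- A's loop body on a line equals pvAL
theorem body_eq_AL (s : PySem.Set String) (l : List Char) :
    (if String.ofList l = "" ∨ PySem.Str.isIn "|" (String.ofList l) = false then s
     else
       let seg := ((PySem.Str.split? (String.ofList l) "|").getD []).headD ""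
       if seg ≠ "" then PySem.Set.add s seg else s)
      = pvAL s l := by
  have hsplit : PySem.Chars.splitOn l ['|'] = (pvSplitc '|' l).1 :: (pvSplitc '|' l).2 := by
    have := L3 '|' (l.length + 1) l [] [] (by omega)
    simpa [PySem.Chars.splitOn] using this
  have hmem : PySem.Str.isIn "|" (String.ofList l) = true ↔ '|' ∈ l := by
    rw [PySem.Str.isIn]
    rw [show ("|" : String).toList = ['|'] from rfl, String.toList_ofList]
    rw [PySem.Chars.isIn_iff_infix]
    exact List.singleton_infix_iff '|' l
  by_cases hp : '|' ∈ l
  · have h1 : PySem.Str.isIn "|" (String.ofList l) = true := hmem.mpr hp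
    have h2 : String.ofList l ≠ "" := by
      simp [String.ofList_eq_empty_iff]; rintro rfl; simp at hp
    have h3 : l.any (· = '|') = true := by simp [List.any_eq_true]; exact hp
    simp only [h1, h2, Bool.true_eq_false, or_self, if_false, false_or]
    rw [PySem.Str.split?]
    simp only [String.toList_ofList, show ("|" : String).toList = ['|'] from rfl]
    rw [PySem.Chars.split?]
    simp only [List.isEmpty_cons, if_neg]
    simp only [hsplit, Option.getD_some, Option.map_some, List.map_cons, List.headD_cons]
    rw [pvAL, stepC_false, pvEmit]
    simp only [h3, splitc_fst]
    by_cases h4 : l.takeWhile (· ≠ '|') = []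
    · simp [h4, String.ofList_eq_empty_iff]
    · simp [h4, String.ofList_eq_empty_iff]
  · have h1 : PySem.Str.isIn "|" (String.ofList l) = false := by
      rcases Bool.eq_false_or_eq_true (PySem.Str.isIn "|" (String.ofList l)) with h | h
      · exact absurd (hmem.mp h) hp
      · exact h
    have h3 : l.any (· = '|') = false := by
      simp [List.any_eq_false]; intro x hx rfl; exact hp hx
    simp only [h1, or_true, if_true]
    rw [pvAL, stepC_false, pvEmit]
    simp [h3]

theorem alt_eq (msg : String) :
    get_all_segments_py_alt msg
      = pvContFold PySem.Set.empty ([], false) (pvSplitAny msg.toList) := by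
  have : get_all_segments_py_alt msg
      = pvEmit (msg.toList.foldl pvStepB (PySem.Set.empty, [], false)).1
               (msg.toList.foldl pvStepB (PySem.Set.empty, [], false)).2 := rfl
  rw [this, L5]

theorem split_lines_eq (msg : String) (h : ¬ msg = "") :
    split_lines_py msg
      = List.map String.ofList
          ((pvSplitc '\r' (pvNorm2 (pvNorm1 msg.toList))).1
            :: (pvSplitc '\r' (pvNorm2 (pvNorm1 msg.toList))).2) := by
  rw [split_lines_py, if_neg h]
  have r1 : PySem.Str.replace msg "\r\n" "\r" = String.ofList (pvNorm1 msg.toList) := by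
    rw [PySem.Str.replace]
    rw [show ("\r\n" : String).toList = ['\r', '\n'] from rfl,
        show ("\r" : String).toList = ['\r'] from rfl]
    rw [PySem.Chars.replace]
    simp only [List.isEmpty_cons, Bool.false_eq_true, if_neg, not_false_iff]
    rw [L1 msg.toList.length msg.toList [] le_rfl]
    rfl
  have r2 : PySem.Str.replace (String.ofList (pvNorm1 msg.toList)) "\n" "\r"
      = String.ofList (pvNorm2 (pvNorm1 msg.toList)) := by
    rw [PySem.Str.replace]
    rw [show ("\n" : String).toList = ['\n'] from rfl,
        show ("\r" : String).toList = ['\r'] from rfl, String.toList_ofList]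
    rw [PySem.Chars.replace]
    simp only [List.isEmpty_cons, Bool.false_eq_true, if_neg, not_false_iff]
    rw [L2 (pvNorm1 msg.toList).length (pvNorm1 msg.toList) [] le_rfl]
    rfl
  rw [r1, r2, PySem.Str.split?]
  rw [show ("\r" : String).toList = ['\r'] from rfl, String.toList_ofList]
  rw [PySem.Chars.split?]
  simp only [List.isEmpty_cons, Bool.false_eq_true, if_neg, not_false_iff]
  rw [PySem.Chars.splitOn,
      L3 '\r' ((pvNorm2 (pvNorm1 msg.toList)).length + 1) _ [] [] (by omega)]
  simp

theorem a_eq (msg : String) (h : ¬ msg = "") :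
    get_all_segments_py msg
      = pvContFold PySem.Set.empty ([], false)
          (pvSplitc '\r' (pvNorm2 (pvNorm1 msg.toList))) := by
  rw [get_all_segments_py, split_lines_eq msg h, List.foldl_map]
  have hcong : (fun (segments : PySem.Set String) (l : List Char) =>
      (fun segments line =>
        if line = "" ∨ PySem.Str.isIn "|" line = false then segments
        else
          let seg_type := ((PySem.Str.split? line "|").getD []).headD ""
          if seg_type ≠ "" then PySem.Set.add segments seg_type else segments)
        segments (String.ofList l)) = pvAL := by
    funext s l
    exact body_eq_AL s l
  rw [hcong]
  simp [pvContFold, pvAL]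

theorem pv_final (msg : String) : get_all_segments_py msg = get_all_segments_py_alt msg := by
  by_cases h : msg = ""
  · subst h; rfl
  · rw [a_eq msg h, alt_eq msg]
    rw [L6 msg.toList.length msg.toList le_rfl]

-- ===== VERDICT (by name: the statement is the Claim_ definition above) =====
theorem get_all_segments_py_spec : Claim_equal_get_all_segments_py := by
  intro msg _
  unfold Spec_get_all_segments_py
  exact pv_final msg
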